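-- pv_equiv track=rewrite | github.com/prxyn/sort | app.py | heap_sort_steps
-- ===== SOURCE A (Python) =====
-- def heap_sort_steps(arr, order):
--     steps = []
--
--     def heapify(n, i):
--         largest_or_smallest = i
--         left = 2 * i + 1
--         right = 2 * i + 2
--
--         if left < n and (
--             (order == "ascending" and arr[left] > arr[largest_or_smallest])
--             or (order == "descending" and arr[left] < arr[largest_or_smallest])
--         ):
--             largest_or_smallest = left
--         if right < n and (
--             (order == "ascending" and arr[right] > arr[largest_or_smallest])
--             or (order == "descending" and arr[right] < arr[largest_or_smallest])
--         ):
--             largest_or_smallest = right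
--         if largest_or_smallest != i:
--             arr[i], arr[largest_or_smallest] = arr[largest_or_smallest], arr[i]
--             steps.append(arr[:])
--             heapify(n, largest_or_smallest)
--
--     for i in range(len(arr) // 2 - 1, -1, -1):
--         heapify(len(arr), i)
--
--     for i in range(len(arr) - 1, 0, -1):
--         arr[i], arr[0] = arr[0], arr[i]
--         steps.append(arr[:])
--         heapify(i, 0)
--
--     return steps
-- ===== SOURCE B (Python) =====
-- def heap_sort_steps(arr, order):
--     steps = []
--     if order == "ascending":
--         key = lambda j: arr[j]
--     elif order == "descending":
--         key = lambda j: -arr[j]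
--     else:
--         key = None
--
--     def sift(n, i):
--         if key is None:
--             return
--         while True:
--             candidates = [i] + [c for c in (2 * i + 1, 2 * i + 2) if c < n]
--             target = max(candidates, key=key)
--             if target == i:
--                 break
--             arr[i], arr[target] = arr[target], arr[i]
--             steps.append(arr[:])
--             i = target
--
--     for i in range(len(arr) // 2 - 1, -1, -1):
--         sift(len(arr), i)
--     for i in range(len(arr) - 1, 0, -1):
--         arr[i], arr[0] = arr[0], arr[i]
--         steps.append(arr[:])
--         sift(i, 0)
--     return steps
-- ===== Notes on version B (the rewrite author's own statement) =====
-- stated objective: idiomatic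
-- what changed: A's recursive heapify with two chained conditional target updates is replaced by an iterative sift-down loop that picks the swap target as max/argmax over the in-range candidate indices using a key function derived once from the order argument.
import Mathlib
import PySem

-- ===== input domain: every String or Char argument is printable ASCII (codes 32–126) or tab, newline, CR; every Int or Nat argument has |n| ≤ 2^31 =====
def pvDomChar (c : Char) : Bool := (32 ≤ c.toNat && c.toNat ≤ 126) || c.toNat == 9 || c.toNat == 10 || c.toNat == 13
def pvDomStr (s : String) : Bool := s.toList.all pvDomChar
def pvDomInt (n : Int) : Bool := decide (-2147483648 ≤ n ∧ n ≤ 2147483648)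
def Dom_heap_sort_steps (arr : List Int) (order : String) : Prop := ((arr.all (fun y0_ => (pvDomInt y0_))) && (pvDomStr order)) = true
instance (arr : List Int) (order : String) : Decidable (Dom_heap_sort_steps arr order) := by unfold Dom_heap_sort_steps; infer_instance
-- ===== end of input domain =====

-- B replaces A's recursive heapify (two chained if-updates) by an iterative sift-down that
-- picks the swap target as max/argmax over the in-range candidate indices with an order-derived
-- key (objective: idiomatic). Both A and B mutate the Python caller's list identically; the
-- equivalence proved here is about the returned steps list.

-- ===== PORT A =====
-- state = (arr, steps); fuel = arr.length + 1 bounds the recursion depth (i strictly increases, i < n)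
def pvHeapifyA (order : String) (n : Int) : Nat → Int → List Int × List (List Int) → List Int × List (List Int)
  | 0, _, st => st
  | fuel + 1, i, st =>
    let a := st.1
    let left := 2 * i + 1
    let right := 2 * i + 2
    let t1 := if left < n ∧ ((order = "ascending" ∧ PySem.List.pyGetD a left 0 > PySem.List.pyGetD a i 0)
                ∨ (order = "descending" ∧ PySem.List.pyGetD a left 0 < PySem.List.pyGetD a i 0)) then left else i
    let t2 := if right < n ∧ ((order = "ascending" ∧ PySem.List.pyGetD a right 0 > PySem.List.pyGetD a t1 0)
                ∨ (order = "descending" ∧ PySem.List.pyGetD a right 0 < PySem.List.pyGetD a t1 0)) then right else t1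
    if t2 ≠ i then
      let a' := PySem.List.pySetD (PySem.List.pySetD a i (PySem.List.pyGetD a t2 0)) t2 (PySem.List.pyGetD a i 0)
      pvHeapifyA order n fuel t2 (a', st.2 ++ [a'])
    else st

def heap_sort_steps (arr : List Int) (order : String) : List (List Int) :=
  let n := PySem.List.len arr
  let fuel := arr.length + 1
  let st1 := (PySem.List.pyRange (PySem.Int.floordiv n 2 - 1) (-1) (-1)).foldl
    (fun st i => pvHeapifyA order n fuel i st) (arr, [])
  let st2 := (PySem.List.pyRange (n - 1) 0 (-1)).foldl
    (fun st i =>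
      let a := st.1
      let a' := PySem.List.pySetD (PySem.List.pySetD a i (PySem.List.pyGetD a 0 0)) 0 (PySem.List.pyGetD a i 0)
      pvHeapifyA order i fuel 0 (a', st.2 ++ [a'])) st1
  st2.2

-- ===== PORT B =====
-- the Python key closes over the in-place-mutated list; modelled by passing the current arr explicitly
def pvKeyOf (order : String) : Option (List Int → Int → Int) :=
  if order = "ascending" then some (fun a j => PySem.List.pyGetD a j 0)
  else if order = "descending" then some (fun a j => -(PySem.List.pyGetD a j 0))
  else none

def pvSiftLoop (k : List Int → Int → Int) (n : Int) : Nat → Int → List Int × List (List Int) → List Int × List (List Int)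
  | 0, _, st => st
  | fuel + 1, i, st =>
    let candidates := [i] ++ ([2 * i + 1, 2 * i + 2].filter (fun c => c < n))
    let target := (PySem.List.max? candidates (k st.1)).getD i   -- candidates nonempty, so max? is some
    if target = i then st
    else
      let a := st.1
      let a' := PySem.List.pySetD (PySem.List.pySetD a i (PySem.List.pyGetD a target 0)) target (PySem.List.pyGetD a i 0)
      pvSiftLoop k n fuel target (a', st.2 ++ [a'])

def pvSift (key : Option (List Int → Int → Int)) (n : Int) (fuel : Nat) (i : Int)
    (st : List Int × List (List Int)) : List Int × List (List Int) :=
  match key with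
  | none => st
  | some k => pvSiftLoop k n fuel i st

def heap_sort_steps_alt (arr : List Int) (order : String) : List (List Int) :=
  let key := pvKeyOf order
  let n := PySem.List.len arr
  let fuel := arr.length + 1
  let st1 := (PySem.List.pyRange (PySem.Int.floordiv n 2 - 1) (-1) (-1)).foldl
    (fun st i => pvSift key n fuel i st) (arr, [])
  let st2 := (PySem.List.pyRange (n - 1) 0 (-1)).foldl
    (fun st i =>
      let a := st.1
      let a' := PySem.List.pySetD (PySem.List.pySetD a i (PySem.List.pyGetD a 0 0)) 0 (PySem.List.pyGetD a i 0)
      pvSift key i fuel 0 (a', st.2 ++ [a'])) st1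
  st2.2

-- ===== PRECONDITION & SPEC =====
def Spec_heap_sort_steps (arr : List Int) (order : String) (out : List (List Int)) : Prop := out = heap_sort_steps_alt arr order
instance (arr : List Int) (order : String) (out : List (List Int)) : Decidable (Spec_heap_sort_steps arr order out) := by unfold Spec_heap_sort_steps; infer_instance

-- ===== CLAIM (what is proved, stated in full; the proofs are below) =====
def Claim_equal_heap_sort_steps : Prop := ∀ (arr : List Int) (order : String), Dom_heap_sort_steps arr order → Spec_heap_sort_steps arr order (heap_sort_steps arr order)

-- ===== LEMMAS AND PROOFS =====

-- Python max over the literal candidate lists, reduced to nested strict-improvement ifs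
lemma pvMax3 (k : Int → Int) (x y z d : Int) :
    (PySem.List.max? [x, y, z] k).getD d =
      (if k (if k x < k y then y else x) < k z then z else if k x < k y then y else x) := by
  simp only [PySem.List.max?, List.foldl_cons, List.foldl_nil]
  split_ifs <;> simp_all <;> (try split_ifs) <;> simp_all <;> omega

lemma pvMax2 (k : Int → Int) (x y d : Int) :
    (PySem.List.max? [x, y] k).getD d = (if k x < k y then y else x) := by
  simp only [PySem.List.max?, List.foldl_cons, List.foldl_nil]
  split_ifs <;> simp_all

lemma pvMax1 (k : Int → Int) (x d : Int) : (PySem.List.max? [x] k).getD d = x := by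
  simp [PySem.List.max?]

lemma heapify_eq_sift (order : String) (n : Int) (fuel : Nat) (i : Int)
    (st : List Int × List (List Int)) :
    pvHeapifyA order n fuel i st = pvSift (pvKeyOf order) n fuel i st := by
  induction fuel generalizing i st with
  | zero => cases hk : pvKeyOf order <;> simp [pvHeapifyA, pvSift, pvSiftLoop]
  | succ fuel ih =>
    by_cases ha : order = "ascending"
    · subst ha
      simp only [pvHeapifyA, pvSift, pvKeyOf, pvSiftLoop]
      by_cases hl : 2 * i + 1 < n <;> by_cases hr : 2 * i + 2 < n <;>
        simp only [hl, hr, pvMax3, pvMax2, pvMax1, List.filter, decide_true, decide_false,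
          List.cons_append, List.nil_append, if_true, if_false, true_and, false_and, or_false,
          show ("ascending" : String) = "descending" ↔ False from by simp, gt_iff_lt] <;>
        split_ifs <;> first
          | rfl
          | omega
          | (rw [ih]; simp [pvSift, pvKeyOf])
    · by_cases hd : order = "descending"
      · subst hd
        simp only [pvHeapifyA, pvSift, pvKeyOf, pvSiftLoop,
          show (("descending" : String) = "ascending") = False from by simp, if_false]
        by_cases hl : 2 * i + 1 < n <;> by_cases hr : 2 * i + 2 < n <;>
          simp only [hl, hr, pvMax3, pvMax2, pvMax1, List.filter, decide_true, decide_false,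
            List.cons_append, List.nil_append, if_true, if_false, true_and, false_and,
            false_or, gt_iff_lt] <;>
          split_ifs <;> first
            | rfl
            | omega
            | (rw [ih]; simp [pvSift, pvKeyOf])
      · simp [pvHeapifyA, pvSift, pvKeyOf, ha, hd]

theorem heap_sort_steps_spec : Claim_equal_heap_sort_steps := by
  intro arr order _
  unfold Spec_heap_sort_steps heap_sort_steps heap_sort_steps_alt
  simp only [heapify_eq_sift]
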